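-- pv_equiv track=rewrite | github.com/Hakanotaskin/DSA210-Project | odds_scraper.py | merge_driver_rows
-- ===== SOURCE A (Python) =====
-- def merge_driver_rows(rows: list[dict]) -> list[dict]:
--     merged = {}
--     for row in rows:
--         code = row["driver_code"]
--         if code not in merged:
--             merged[code] = row.copy()
--         else:
--             if row.get("race_win_odds"): merged[code]["race_win_odds"] = row["race_win_odds"]
--             if row.get("podium_odds"): merged[code]["podium_odds"] = row["podium_odds"]
--     return list(merged.values())
-- ===== SOURCE B (Python) =====
-- def merge_driver_rows(rows: list[dict]) -> list[dict]:
--     # Pass 1: group rows by driver_code, preserving first-seen order of codes.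
--     groups = {}
--     for row in rows:
--         groups.setdefault(row["driver_code"], []).append(row)
--     # Pass 2: reduce each group: copy of its first row, later truthy odds overwrite.
--     result = []
--     for group in groups.values():
--         base = group[0].copy()
--         for row in group[1:]:
--             if row.get("race_win_odds"):
--                 base["race_win_odds"] = row["race_win_odds"]
--             if row.get("podium_odds"):
--                 base["podium_odds"] = row["podium_odds"]
--         result.append(base)
--     return result
-- ===== Notes on version B (the rewrite author's own statement) =====
-- stated objective: alternative
-- what changed: A merges in one interleaved pass that mutates a dict of partially-built rows; B first builds an insertion-ordered index code -> list of rows, then separately reduces each group by folding the tail over a copy of its first row.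
import Mathlib
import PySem

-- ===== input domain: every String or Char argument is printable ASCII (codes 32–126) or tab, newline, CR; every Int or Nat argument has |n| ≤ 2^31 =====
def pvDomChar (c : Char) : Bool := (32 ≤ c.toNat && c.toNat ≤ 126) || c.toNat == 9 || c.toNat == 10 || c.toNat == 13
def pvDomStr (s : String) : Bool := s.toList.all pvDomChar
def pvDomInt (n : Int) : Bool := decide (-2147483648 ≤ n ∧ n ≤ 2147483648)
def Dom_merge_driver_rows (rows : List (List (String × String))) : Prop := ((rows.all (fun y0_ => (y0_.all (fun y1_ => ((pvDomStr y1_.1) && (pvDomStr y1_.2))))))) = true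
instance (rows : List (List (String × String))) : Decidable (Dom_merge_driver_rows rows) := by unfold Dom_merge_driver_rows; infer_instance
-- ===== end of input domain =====

-- B replaces A's single interleaved merge pass by build-index-then-reduce (alternative decomposition, same cost).

-- shared helper: row.get(f) with "" for missing (truthy test is ≠ "")
def pvField (row : List (String × String)) (f : String) : String :=
  (PySem.Dict.mk row).getD f ""

-- ===== PORT A =====
def merge_driver_rows (rows : List (List (String × String))) : List (List (String × String)) :=
  let merged := rows.foldl (fun m row =>
    let code := pvField row "driver_code"
    if m.contains code = false then
      m.insert code (PySem.Dict.mk row)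
    else
      let m1 := if pvField row "race_win_odds" ≠ "" then
          m.modify code PySem.Dict.empty (fun d => d.insert "race_win_odds" (pvField row "race_win_odds"))
        else m
      if pvField row "podium_odds" ≠ "" then
        m1.modify code PySem.Dict.empty (fun d => d.insert "podium_odds" (pvField row "podium_odds"))
      else m1) PySem.Dict.empty
  merged.values.map PySem.Dict.items

-- ===== PORT B =====
-- B's inner reduction step: overwrite the two odds fields when truthy
def pvStepB (base : PySem.Dict String String) (row : List (String × String)) : PySem.Dict String String :=
  let b1 := if pvField row "race_win_odds" ≠ "" then
      base.insert "race_win_odds" (pvField row "race_win_odds")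
    else base
  if pvField row "podium_odds" ≠ "" then
    b1.insert "podium_odds" (pvField row "podium_odds")
  else b1

def merge_driver_rows_alt (rows : List (List (String × String))) : List (List (String × String)) :=
  -- pass 1: groups.setdefault(code, []).append(row)  (d[k] = d.get(k, []) + [row])
  let groups := rows.foldl
    (fun g row => g.modify (pvField row "driver_code") [] (fun l => l ++ [row])) PySem.Dict.empty
  -- pass 2: reduce each group over a copy of its first row
  groups.items.map (fun p =>
    match p.2 with
    | [] => []
    | first :: rest => (rest.foldl pvStepB (PySem.Dict.mk first)).items)

-- ===== PRECONDITION & SPEC =====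
-- Pre_ excludes exactly the rows missing the "driver_code" key, on which Python A raises KeyError.
def Pre_merge_driver_rows (rows : List (List (String × String))) : Prop :=
  (rows.all (fun row => (PySem.Dict.mk row).contains "driver_code")) = true
instance (rows : List (List (String × String))) : Decidable (Pre_merge_driver_rows rows) := by unfold Pre_merge_driver_rows; infer_instance

def pvWitness_merge_driver_rows : (List (List (String × String))) :=
  [[("driver_code", "VER"), ("race_win_odds", "2.5")], [("driver_code", "VER"), ("podium_odds", "1.3")]]

def Spec_merge_driver_rows (rows : List (List (String × String))) (out : List (List (String × String))) : Prop := out = merge_driver_rows_alt rows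
instance (rows : List (List (String × String))) (out : List (List (String × String))) : Decidable (Spec_merge_driver_rows rows out) := by unfold Spec_merge_driver_rows; infer_instance

-- ===== CLAIM (what is proved, stated in full; the proofs are below) =====
def Claim_equal_merge_driver_rows : Prop := ∀ (rows : List (List (String × String))), Dom_merge_driver_rows rows → Pre_merge_driver_rows rows → Spec_merge_driver_rows rows (merge_driver_rows rows)

-- ===== LEMMAS AND PROOFS =====

-- the reduced row of one group (empty group never occurs in B's dict)
def pvRed (rs : List (List (String × String))) : PySem.Dict String String :=
  match rs with
  | [] => PySem.Dict.empty
  | first :: rest => rest.foldl pvStepB (PySem.Dict.mk first)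

def pvF (p : String × List (List (String × String))) : String × PySem.Dict String String :=
  (p.1, pvRed p.2)

-- the coupling invariant between A's accumulator m and B's accumulator g
def pvInv (m : PySem.Dict String (PySem.Dict String String))
    (g : PySem.Dict String (List (List (String × String)))) : Prop :=
  m.items = g.items.map pvF ∧ g.keys.Nodup ∧ ∀ p ∈ g.items, p.2 ≠ []

theorem pvRed_append (gv : List (List (String × String))) (row : List (String × String))
    (h : gv ≠ []) : pvRed (gv ++ [row]) = pvStepB (pvRed gv) row := by
  cases gv with
  | nil => exact absurd rfl h
  | cons f rest => simp [pvRed, List.foldl_append]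

theorem pv_get_map (m : PySem.Dict String (PySem.Dict String String))
    (g : PySem.Dict String (List (List (String × String))))
    (hitems : m.items = g.items.map pvF) (k : String) :
    m.get? k = (g.get? k).map pvRed := by
  simp only [PySem.Dict.get?, hitems, List.find?_map]
  have : ((fun p => p.1 == k) ∘ pvF) = (fun (p : String × List (List (String × String))) => p.1 == k) := by
    funext p; rfl
  rw [this]
  cases g.items.find? (fun p => p.1 == k) <;> simp [pvF]

theorem pv_contains_map (m : PySem.Dict String (PySem.Dict String String))
    (g : PySem.Dict String (List (List (String × String))))
    (hitems : m.items = g.items.map pvF) (k : String) :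
    m.contains k = g.contains k := by
  simp only [PySem.Dict.contains, hitems, List.any_map]
  rfl

theorem pvInv_step (m : PySem.Dict String (PySem.Dict String String))
    (g : PySem.Dict String (List (List (String × String)))) (row : List (String × String))
    (h : pvInv m g) :
    pvInv
      (let code := pvField row "driver_code"
       if m.contains code = false then
         m.insert code (PySem.Dict.mk row)
       else
         let m1 := if pvField row "race_win_odds" ≠ "" then
             m.modify code PySem.Dict.empty (fun d => d.insert "race_win_odds" (pvField row "race_win_odds"))
           else m
         if pvField row "podium_odds" ≠ "" then
           m1.modify code PySem.Dict.empty (fun d => d.insert "podium_odds" (pvField row "podium_odds"))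
         else m1)
      (g.modify (pvField row "driver_code") [] (fun l => l ++ [row])) := by
  obtain ⟨hitems, hnd, hne⟩ := h
  set code := pvField row "driver_code" with hcode
  have hcont := pv_contains_map m g hitems code
  have hget := pv_get_map m g hitems code
  by_cases hc : g.contains code = true
  · -- existing code
    obtain ⟨gv, hgv⟩ : ∃ v, g.get? code = some v := by
      rw [PySem.Dict.contains_eq_isSome_get?] at hc
      exact Option.isSome_iff_exists.mp hc
    have hmem : (code, gv) ∈ g.items := PySem.Dict.mem_items_of_get?_eq_some g hgv
    have hgvne : gv ≠ [] := hne _ hmem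
    have hmgd : m.getD code PySem.Dict.empty = pvRed gv := by
      rw [PySem.Dict.getD_eq_get?_getD, hget, hgv]; rfl
    have hmc : m.contains code = true := by rw [hcont]; exact hc
    have hBitems : (g.modify code [] (fun l => l ++ [row])).items
        = g.items.map (fun p => if p.1 == code then (code, gv ++ [row]) else p) := by
      show (g.insert code (g.getD code [] ++ [row])).items = _
      rw [PySem.Dict.getD_eq_get?_getD, hgv]
      exact PySem.Dict.items_insert_of_contains g _ hc
    have hp2eq : ∀ p ∈ g.items, p.1 = code → p.2 = gv := by
      intro p hp hpc
      have hmem' : (code, p.2) ∈ g.items := by rw [← hpc]; simpa [Prod.ext_iff] using hp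
      have h2 := PySem.Dict.get?_of_mem_items g hmem' hnd
      exact Option.some.inj (h2.symm.trans hgv)
    rw [if_neg (by simp [hmc])]
    refine ⟨?_, ?_, ?_⟩
    · -- items equality
      rw [hBitems, ← List.comp_map]
      by_cases h1 : pvField row "race_win_odds" ≠ "" <;> by_cases h2 : pvField row "podium_odds" ≠ ""
      · rw [if_pos h1, if_pos h2]
        have hA : (m.modify code PySem.Dict.empty (fun d => d.insert "race_win_odds" (pvField row "race_win_odds"))).modify code PySem.Dict.empty (fun d => d.insert "podium_odds" (pvField row "podium_odds")) = m.insert code (pvStepB (pvRed gv) row) := by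
          simp [PySem.Dict.modify, PySem.Dict.getD_insert_self, PySem.Dict.insert_insert_self, hmgd, pvStepB, h1, h2]
        rw [hA, PySem.Dict.items_insert_of_contains m _ hmc, hitems, List.map_map]
        refine List.map_congr_left (fun p hp => ?_)
        by_cases hpc : p.1 = code
        · simp [Function.comp, pvF, hpc, pvRed_append gv row hgvne]
        · simp [Function.comp, pvF, hpc]
      · rw [if_pos h1, if_neg h2]
        have hA : m.modify code PySem.Dict.empty (fun d => d.insert "race_win_odds" (pvField row "race_win_odds")) = m.insert code (pvStepB (pvRed gv) row) := by
          simp [PySem.Dict.modify, hmgd, pvStepB, h1, h2]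
        rw [hA, PySem.Dict.items_insert_of_contains m _ hmc, hitems, List.map_map]
        refine List.map_congr_left (fun p hp => ?_)
        by_cases hpc : p.1 = code
        · simp [Function.comp, pvF, hpc, pvRed_append gv row hgvne]
        · simp [Function.comp, pvF, hpc]
      · rw [if_neg h1, if_pos h2]
        have hA : m.modify code PySem.Dict.empty (fun d => d.insert "podium_odds" (pvField row "podium_odds")) = m.insert code (pvStepB (pvRed gv) row) := by
          simp [PySem.Dict.modify, hmgd, pvStepB, h1, h2]
        rw [hA, PySem.Dict.items_insert_of_contains m _ hmc, hitems, List.map_map]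
        refine List.map_congr_left (fun p hp => ?_)
        by_cases hpc : p.1 = code
        · simp [Function.comp, pvF, hpc, pvRed_append gv row hgvne]
        · simp [Function.comp, pvF, hpc]
      · rw [if_neg h1, if_neg h2, hitems]
        refine List.map_congr_left (fun p hp => ?_)
        by_cases hpc : p.1 = code
        · simp [Function.comp, pvF, hpc, pvRed_append gv row hgvne, hp2eq p hp hpc, pvStepB, h1, h2]
        · simp [Function.comp, pvF, hpc]
    · -- keys nodup
      show (g.insert code (g.getD code [] ++ [row])).keys.Nodup
      rw [PySem.Dict.keys_insert_of_contains g _ hc]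
      exact hnd
    · -- values nonempty
      intro p hp
      rw [hBitems] at hp
      obtain ⟨q, hq, hqe⟩ := List.mem_map.mp hp
      by_cases hqc : q.1 = code
      · simp [hqc] at hqe; simp [← hqe]
      · simp [hqc] at hqe; rw [← hqe]; exact hne q hq
  · -- fresh code
    have hmc : m.contains code = false := by rw [hcont]; simpa using hc
    have hgD : g.getD code [] = [] := PySem.Dict.getD_of_not_contains g [] (by simpa using hc)
    rw [if_pos (by simp [hmc])]
    have hBins : g.modify code [] (fun l => l ++ [row]) = g.insert code [row] := by
      show g.insert code (g.getD code [] ++ [row]) = _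
      rw [hgD]; rfl
    refine ⟨?_, ?_, ?_⟩
    · rw [hBins, PySem.Dict.items_insert_of_not_contains m _ (by simp [hmc]),
        PySem.Dict.items_insert_of_not_contains g _ (by simpa using hc), List.map_append, hitems]
      rfl
    · rw [hBins, PySem.Dict.keys_insert_of_not_contains g _ (by simpa using hc)]
      refine List.nodup_append.mpr ⟨hnd, List.nodup_singleton _, ?_⟩
      intro a ha b hb
      rw [List.mem_singleton] at hb
      subst hb
      intro hab
      subst hab
      exact (by simpa [PySem.Dict.contains_iff_mem_keys] using hc : code ∉ g.keys) ha
    · intro p hp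
      rw [hBins] at hp
      rcases (PySem.Dict.mem_items_insert g _ _ _).mp hp with h | ⟨h, _⟩
      · simp [h]
      · exact hne p h

theorem pvInv_foldl (rows : List (List (String × String)))
    (m : PySem.Dict String (PySem.Dict String String))
    (g : PySem.Dict String (List (List (String × String)))) (h : pvInv m g) :
    pvInv
      (rows.foldl (fun m row =>
        let code := pvField row "driver_code"
        if m.contains code = false then
          m.insert code (PySem.Dict.mk row)
        else
          let m1 := if pvField row "race_win_odds" ≠ "" then
              m.modify code PySem.Dict.empty (fun d => d.insert "race_win_odds" (pvField row "race_win_odds"))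
            else m
          if pvField row "podium_odds" ≠ "" then
            m1.modify code PySem.Dict.empty (fun d => d.insert "podium_odds" (pvField row "podium_odds"))
          else m1) m)
      (rows.foldl (fun g row => g.modify (pvField row "driver_code") [] (fun l => l ++ [row])) g) := by
  induction rows generalizing m g with
  | nil => exact h
  | cons r rs ih => exact ih _ _ (pvInv_step m g r h)

-- ===== VERDICT (by name: the statement is the Claim_ definition above) =====
theorem merge_driver_rows_spec : Claim_equal_merge_driver_rows := by
  intro rows _ _
  unfold Spec_merge_driver_rows merge_driver_rows merge_driver_rows_alt
  obtain ⟨hitems, _, hne⟩ := pvInv_foldl rows PySem.Dict.empty PySem.Dict.empty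
    ⟨rfl, List.nodup_nil, by intro p hp; simp [PySem.Dict.empty] at hp⟩
  simp only [PySem.Dict.values, hitems, List.map_map]
  apply List.map_congr_left
  intro p hp
  obtain ⟨first, rest, hrs⟩ := List.exists_cons_of_ne_nil (hne p hp)
  simp [pvF, pvRed, hrs, Function.comp]
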